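-- pv_equiv track=rewrite | github.com/michelleh1109/portfolio | kmeans_clustering/a6algorithm.py | valid_seeds
-- ===== SOURCE A (Python) =====
-- def valid_seeds(value, size):
--     """
--     Returns True if value is a valid list of seeds for clustering.
--
--     A list of seeds is a k-element list OR tuple of integersa between 0 and size-1.
--     In addition, no seed element can appear twice.
--
--     Parameter valud: a value to check
--     Precondition: value can be anything
--
--     Paramater size: The database size
--     Precondition: size is an int > 0
--     """
--     assert isinstance(size, int) and size>0
--     if not isinstance(value, list) and not isinstance(value, tuple):
--         return False
--     for i in range(len(value)):
--         if not isinstance(value[i], int):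
--             return False
--         if value[i]<0 or value[i]>(size-1):
--             return False
--         if value[i] in value[:i]+value[i+1:]:
--             return False
--     return True
-- ===== SOURCE B (Python) =====
-- def valid_seeds(value, size):
--     assert isinstance(size, int) and size > 0
--     if not isinstance(value, (list, tuple)):
--         return False
--     if not all(isinstance(x, int) and 0 <= x <= size - 1 for x in value):
--         return False
--     return len(set(value)) == len(value)
-- ===== Notes on version B (the rewrite author's own statement) =====
-- stated objective: simpler
-- what changed: replaced A's single interleaved loop with per-element slice-membership duplicate tests by one all() pass for type/range plus one aggregate set-cardinality comparison for duplicates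
import Mathlib
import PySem

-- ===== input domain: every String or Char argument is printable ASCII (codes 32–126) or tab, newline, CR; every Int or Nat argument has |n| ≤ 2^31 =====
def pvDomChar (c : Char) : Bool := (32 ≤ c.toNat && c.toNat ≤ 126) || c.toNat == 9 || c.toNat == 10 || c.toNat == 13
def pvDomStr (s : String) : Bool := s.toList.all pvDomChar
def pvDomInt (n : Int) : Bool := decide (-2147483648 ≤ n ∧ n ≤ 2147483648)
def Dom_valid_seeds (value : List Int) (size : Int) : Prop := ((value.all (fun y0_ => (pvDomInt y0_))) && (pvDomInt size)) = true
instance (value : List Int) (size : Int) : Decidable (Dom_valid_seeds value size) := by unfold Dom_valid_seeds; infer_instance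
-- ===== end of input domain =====

-- B replaces A's interleaved per-element slice-membership loop by one range pass plus one aggregate set-cardinality duplicate check (simpler).


-- ===== PORT A =====
-- the loop 'for i in range(len(value))' with early returns; isinstance checks are
-- always true under the type convention (value : List Int).  value[i] is in range
-- for every index produced by range(len(value)), so pyGetD is exact here.
def valid_seeds_loopA (value : List Int) (size : Int) : List Int → Bool
  | [] => true
  | i :: rest =>
    let v := PySem.List.pyGetD value i 0
    if v < 0 || v > size - 1 then false
    else if (PySem.List.slice value none (some i) ++
             PySem.List.slice value (some (i + 1)) none).contains v then false
    else valid_seeds_loopA value size rest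

-- 'assert size > 0' is Pre_valid_seeds; the list/tuple guard is always passed.
def valid_seeds (value : List Int) (size : Int) : Bool :=
  valid_seeds_loopA value size (PySem.List.pyRange 0 value.length 1)

-- ===== PORT B =====
def valid_seeds_alt (value : List Int) (size : Int) : Bool :=
  if !(value.all (fun x => decide (0 ≤ x) && decide (x ≤ size - 1))) then false
  else decide ((PySem.Set.ofList value).length = value.length)

-- ===== PRECONDITION & SPEC =====
-- Pre_: the Python assert raises AssertionError for size ≤ 0.
def Pre_valid_seeds (value : List Int) (size : Int) : Prop := 0 < size
instance (value : List Int) (size : Int) : Decidable (Pre_valid_seeds value size) := by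
  unfold Pre_valid_seeds; infer_instance
def pvWitness_valid_seeds : List Int × Int := ([0, 2], 3)

def Spec_valid_seeds (value : List Int) (size : Int) (out : Bool) : Prop := out = valid_seeds_alt value size
instance (value : List Int) (size : Int) (out : Bool) : Decidable (Spec_valid_seeds value size out) := by unfold Spec_valid_seeds; infer_instance

-- ===== CLAIM (what is proved, stated in full; the proofs are below) =====
def Claim_equal_valid_seeds : Prop := ∀ (value : List Int) (size : Int), Dom_valid_seeds value size → Pre_valid_seeds value size → Spec_valid_seeds value size (valid_seeds value size)

-- ===== LEMMAS AND PROOFS =====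

-- set(xs) as built by folding Set.add over xs is s ++ (a sublist of xs)
theorem foldl_setAdd_sublist (xs : List Int) : ∀ s : List Int,
    ∃ t, xs.foldl PySem.Set.add s = s ++ t ∧ t.Sublist xs := by
  induction xs with
  | nil => intro s; exact ⟨[], by simp⟩
  | cons x xs ih =>
    intro s
    by_cases h : x ∈ s
    · obtain ⟨t, ht, hs⟩ := ih s
      exact ⟨t, by simp [PySem.Set.add, h, ht], hs.cons _⟩
    · obtain ⟨t, ht, hs⟩ := ih (s ++ [x])
      exact ⟨x :: t, by simp [PySem.Set.add, h, ht], hs.cons₂ _⟩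

theorem foldl_setAdd_of_nodup (xs : List Int) : ∀ s : List Int, xs.Nodup →
    (∀ x ∈ xs, x ∉ s) → xs.foldl PySem.Set.add s = s ++ xs := by
  induction xs with
  | nil => intro s _ _; simp
  | cons x xs ih =>
    intro s hnd hni
    have hx : x ∉ s := hni x (by simp)
    have := ih (s ++ [x]) hnd.of_cons (by
      intro y hy
      have hys : y ∉ s := hni y (by simp [hy])
      have hyx : y ≠ x := fun h => (List.nodup_cons.mp hnd).1 (h ▸ hy)
      simp [hys, hyx])
    simp [PySem.Set.add, hx, this]

theorem ofList_length_iff (xs : List Int) :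
    (PySem.Set.ofList xs).length = xs.length ↔ xs.Nodup := by
  constructor
  · intro h
    obtain ⟨t, ht, hs⟩ := foldl_setAdd_sublist xs []
    have : PySem.Set.ofList xs = t := by simpa [PySem.Set.ofList] using ht
    have hteq : t = xs := hs.eq_of_length (by rw [← this, h])
    have := PySem.Set.nodup_ofList (α := Int) xs
    rwa [‹PySem.Set.ofList xs = t›, hteq] at this
  · intro h
    have := foldl_setAdd_of_nodup xs [] h (by intro x _; simp)
    simp [PySem.Set.ofList, this]

theorem nodup_iff_eraseIdx (l : List Int) :
    l.Nodup ↔ ∀ j (h : j < l.length), l[j] ∉ l.eraseIdx j := by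
  induction l with
  | nil => simp
  | cons a l ih =>
    rw [List.nodup_cons, ih]
    constructor
    · rintro ⟨ha, hl⟩ j hj
      cases j with
      | zero => simpa using ha
      | succ j =>
        simp only [List.eraseIdx_cons_succ, List.getElem_cons_succ, List.mem_cons]
        push_neg
        refine ⟨fun h => ha (h ▸ l.getElem_mem _), hl j (by simpa using hj)⟩
    · intro h
      refine ⟨by simpa using h 0 (by simp), fun j hj => ?_⟩
      have := h (j + 1) (by simpa using hj)
      simp only [List.eraseIdx_cons_succ, List.getElem_cons_succ, List.mem_cons] at this
      push_neg at this
      exact this.2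

theorem valid_seeds_alt_iff (value : List Int) (size : Int) :
    valid_seeds_alt value size = true ↔
      (∀ v ∈ value, 0 ≤ v ∧ v ≤ size - 1) ∧ value.Nodup := by
  simp [valid_seeds_alt, ofList_length_iff]

theorem loopA_iff (value : List Int) (size : Int) :
    ∀ (n a : Nat), a + n = value.length →
      (valid_seeds_loopA value size (PySem.List.pyRange a value.length 1) = true ↔
        ∀ j (hj : j < value.length), a ≤ j →
          0 ≤ value[j] ∧ value[j] ≤ size - 1 ∧ value[j] ∉ value.eraseIdx j) := by
  intro n
  induction n with
  | zero =>
    intro a ha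
    rw [PySem.List.pyRange_one_eq_nil (by exact_mod_cast Nat.le_of_eq ha.symm)]
    simp only [valid_seeds_loopA, true_iff]
    intro j hj haj
    exact absurd hj (by omega)
  | succ n ih =>
    intro a ha
    have hlt : a < value.length := by omega
    rw [PySem.List.pyRange_one_cons (by exact_mod_cast hlt)]
    have hget : PySem.List.pyGetD value (a : Int) 0 = value[a] := by
      rw [PySem.List.pyGetD_natCast, List.getD_eq_getElem value 0 hlt]
    have hsl : PySem.List.slice value none (some (a : Int)) ++
        PySem.List.slice value (some ((a : Int) + 1)) none = value.eraseIdx a := by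
      rw [PySem.List.slice_to value (by exact_mod_cast Nat.zero_le a),
          PySem.List.slice_from value (by omega)]
      have h1 : ((a : Int)).toNat = a := by omega
      have h2 : ((a : Int) + 1).toNat = a + 1 := by omega
      rw [h1, h2, ← List.eraseIdx_eq_take_drop_succ]
    simp only [valid_seeds_loopA, hget, hsl]
    split_ifs with h1 h2
    · simp only [false_iff]
      intro h
      obtain ⟨c1, c2, -⟩ := h a hlt le_rfl
      simp only [Bool.or_eq_true, decide_eq_true_eq] at h1
      omega
    · simp only [false_iff]
      intro h
      exact (h a hlt le_rfl).2.2 (by simpa using h2)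
    · have hih := ih (a + 1) (by omega)
      rw [Nat.cast_add, Nat.cast_one] at hih
      rw [hih]
      simp only [Bool.or_eq_true, decide_eq_true_eq, not_or] at h1
      constructor
      · intro h j hj haj
        rcases Nat.eq_or_lt_of_le haj with heq | hlt'
        · subst heq
          refine ⟨by omega, by omega, by simpa using h2⟩
        · exact h j hj hlt'
      · intro h j hj haj
        exact h j hj (by omega)

theorem valid_seeds_iff (value : List Int) (size : Int) :
    valid_seeds value size = true ↔
      (∀ v ∈ value, 0 ≤ v ∧ v ≤ size - 1) ∧ value.Nodup := by
  unfold valid_seeds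
  have h := loopA_iff value size value.length 0 (by omega)
  rw [Nat.cast_zero] at h
  rw [h, nodup_iff_eraseIdx]
  constructor
  · intro h
    refine ⟨fun v hv => ?_, fun j hj => (h j hj (Nat.zero_le _)).2.2⟩
    obtain ⟨j, hj, rfl⟩ := List.getElem_of_mem hv
    exact ⟨(h j hj (Nat.zero_le _)).1, (h j hj (Nat.zero_le _)).2.1⟩
  · rintro ⟨hr, hd⟩ j hj _
    exact ⟨(hr _ (value.getElem_mem hj)).1, (hr _ (value.getElem_mem hj)).2, hd j hj⟩

-- ===== VERDICT (by name: the statement is the Claim_ definition above) =====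
theorem valid_seeds_spec : Claim_equal_valid_seeds := by
  intro value size _ _
  unfold Spec_valid_seeds
  rw [Bool.eq_iff_iff, valid_seeds_iff, valid_seeds_alt_iff]
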